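-- pv_equiv track=rewrite | github.com/wuc567/Pattern-Mining | MAUE-Miner/Algorithms/Sow-H.py | reconstruction_database
-- ===== SOURCE A (Python) =====
-- def reconstruction_database(utility_list):
--     res = []
--     rmu = []
--     neu = []  # 新效用值（int）
--     for subl in utility_list:
--         max_u = 0
--         subl.reverse()
--         res_sub = []
--         rmu_sub = []
--         neu_sub = []
--         for i in range(len(subl)):
--             neu_sub.append(int(subl[i]))
--             res_sub.append(i)
--             rmu_sub.append(max_u)
--             max_u = max(max_u, int(subl[i]))
--         res.append(list(reversed(res_sub)))
--         rmu.append(list(reversed(rmu_sub)))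
--         neu.append(list(reversed(neu_sub)))
--     return neu, res, rmu
-- ===== SOURCE B (Python) =====
-- def reconstruction_database(utility_list):
--     # Three independent staged passes instead of A's single mutating scan:
--     # neu by a plain int map, res as a descending range, rmu by per-index max
--     # over the suffix slice.  Each sublist is still reversed in place at the
--     # end (the same observable mutation A performs).
--     neu = [[int(x) for x in subl] for subl in utility_list]
--     res = [list(range(len(subl) - 1, -1, -1)) for subl in utility_list]
--     rmu = [[max([0] + ints[i + 1:]) for i in range(len(ints))] for ints in neu]
--     for subl in utility_list:
--         subl.reverse()
--     return neu, res, rmu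
-- ===== Notes on version B (the rewrite author's own statement) =====
-- stated objective: alternative
-- what changed: Replaces A's single mutating reverse-scan-reverse loop carrying a running max with three independent staged comprehensions: neu by a plain int map, res as a descending range, and rmu by a per-index brute-force max over the suffix slice ints[i+1:] (quadratic per sublist instead of a running max); the in-place sublist reversal side effect is kept.
import Mathlib
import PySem

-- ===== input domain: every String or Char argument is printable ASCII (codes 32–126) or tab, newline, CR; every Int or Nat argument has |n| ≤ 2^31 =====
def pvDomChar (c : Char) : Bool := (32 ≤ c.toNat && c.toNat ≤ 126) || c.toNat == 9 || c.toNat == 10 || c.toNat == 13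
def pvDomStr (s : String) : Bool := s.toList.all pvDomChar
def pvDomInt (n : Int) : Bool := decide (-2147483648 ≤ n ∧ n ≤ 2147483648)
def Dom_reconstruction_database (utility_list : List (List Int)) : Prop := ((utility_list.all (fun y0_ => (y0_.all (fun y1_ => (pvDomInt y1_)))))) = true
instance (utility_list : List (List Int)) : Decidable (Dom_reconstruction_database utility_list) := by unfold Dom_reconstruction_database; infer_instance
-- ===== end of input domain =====

-- B builds neu/res/rmu in three independent staged passes (int map, descending range,
-- per-index max over the suffix slice) instead of A's single mutating reverse-scan-reverse
-- loop with a running max; return-value equivalence only: both Pythons also reverse every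
-- sublist in place (the same mutation, not modelled here).


-- ===== PORT A =====
-- inner loop body: state (max_u, i, neu_sub, res_sub, rmu_sub)
def pvStepA (st : Int × Int × List Int × List Int × List Int) (x : Int) :
    Int × Int × List Int × List Int × List Int :=
  (max st.1 x, st.2.1 + 1, st.2.2.1 ++ [x], st.2.2.2.1 ++ [st.2.1], st.2.2.2.2 ++ [st.1])

-- outer loop body of A: reverse subl, forward scan, reverse the three produced sublists
def pvOuterA (acc : List (List Int) × List (List Int) × List (List Int)) (subl : List Int) :
    List (List Int) × List (List Int) × List (List Int) :=
  let r := subl.reverse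
  let st := r.foldl pvStepA (0, 0, [], [], [])
  (acc.1 ++ [st.2.2.1.reverse], acc.2.1 ++ [st.2.2.2.1.reverse], acc.2.2 ++ [st.2.2.2.2.reverse])

def reconstruction_database (utility_list : List (List Int)) :
    List (List Int) × List (List Int) × List (List Int) :=
  utility_list.foldl pvOuterA ([], [], [])

-- ===== PORT B =====
-- Python max of a nonempty list: fold of max over the tail starting from the head
def pvPyMax (l : List Int) : Int :=
  match l with
  | [] => 0
  | h :: t => t.foldl max h

-- [max([0] + ints[i+1:]) for i in range(len(ints))]
def pvRmuRow (ints : List Int) : List Int :=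
  (PySem.List.pyRange 0 (ints.length : Int) 1).map
    (fun i => pvPyMax ((0 : Int) :: PySem.List.slice ints (some (i + 1)) none))

def reconstruction_database_alt (utility_list : List (List Int)) :
    List (List Int) × List (List Int) × List (List Int) :=
  let neu := utility_list.map (fun s => s.map (fun x => x))
  let res := utility_list.map (fun s => PySem.List.pyRange ((s.length : Int) - 1) (-1) (-1))
  let rmu := neu.map pvRmuRow
  (neu, res, rmu)

-- ===== PRECONDITION & SPEC =====
def Spec_reconstruction_database (utility_list : List (List Int)) (out : List (List Int) × List (List Int) × List (List Int)) : Prop := out = reconstruction_database_alt utility_list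
instance (utility_list : List (List Int)) (out : List (List Int) × List (List Int) × List (List Int)) : Decidable (Spec_reconstruction_database utility_list out) := by unfold Spec_reconstruction_database; infer_instance

-- ===== CLAIM (what is proved, stated in full; the proofs are below) =====
def Claim_equal_reconstruction_database : Prop := ∀ (utility_list : List (List Int)), Dom_reconstruction_database utility_list → Spec_reconstruction_database utility_list (reconstruction_database utility_list)

-- ===== LEMMAS AND PROOFS =====

-- index list i, i+1, … of the same length as the argument
def pvIdxs (i : Int) : List Int → List Int
  | [] => []
  | _ :: t => i :: pvIdxs (i + 1) t

-- exclusive running maxima from the left, seeded with m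
def pvPm (m : Int) : List Int → List Int
  | [] => []
  | x :: t => m :: pvPm (max m x) t

theorem foldl_stepA (l : List Int) (m i : Int) (ne rs ru : List Int) :
    l.foldl pvStepA (m, i, ne, rs, ru) =
      (l.foldl max m, i + l.length, ne ++ l, rs ++ pvIdxs i l, ru ++ pvPm m l) := by
  induction l generalizing m i ne rs ru with
  | nil => simp [pvIdxs, pvPm]
  | cons x t ih =>
      simp only [List.foldl_cons, pvStepA, ih, pvIdxs, pvPm, Prod.mk.injEq]
      refine ⟨trivial, by push_cast [List.length_cons]; omega, by simp, by simp, by simp⟩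

theorem pvIdxs_eq (i : Int) (l : List Int) :
    pvIdxs i l = (List.range l.length).map (fun k : Nat => i + (k : Int)) := by
  induction l generalizing i with
  | nil => simp [pvIdxs]
  | cons x t ih =>
      rw [pvIdxs, ih, List.length_cons, List.range_succ_eq_map, List.map_cons, List.map_map]
      congr 1
      · norm_num
      · exact List.map_congr_left (fun k _ => by simp [Function.comp]; ring)

theorem pyRange_countdown (n : Nat) :
    PySem.List.pyRange ((n : Int) - 1) (-1) (-1) =
      (List.range n).map (fun k : Nat => (n : Int) - 1 - (k : Int)) := by
  rw [PySem.List.pyRange_neg_one]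
  have h : ((n : Int) - 1 - -1).toNat = n := by omega
  rw [h]

theorem idxs_rev_eq_pyRange (l : List Int) :
    (pvIdxs 0 l).reverse = PySem.List.pyRange ((l.length : Int) - 1) (-1) (-1) := by
  rw [pvIdxs_eq, pyRange_countdown]
  apply List.ext_getElem
  · simp
  · intro k h1 h2
    simp at h1 ⊢
    omega

theorem pvPm_append (m : Int) (a : List Int) (x : Int) :
    pvPm m (a ++ [x]) = pvPm m a ++ [a.foldl max m] := by
  induction a generalizing m with
  | nil => simp [pvPm]
  | cons y t ih => simp [pvPm, ih]

theorem foldl_max_out (t : List Int) (a x : Int) :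
    t.foldl max (max a x) = max (t.foldl max a) x := by
  induction t generalizing a with
  | nil => rfl
  | cons y s ih =>
      simp only [List.foldl_cons]
      rw [max_right_comm a x y, ih]

theorem foldl_max_reverse (t : List Int) (a : Int) :
    t.reverse.foldl max a = t.foldl max a := by
  induction t generalizing a with
  | nil => rfl
  | cons x s ih =>
      simp only [List.reverse_cons, List.foldl_append, List.foldl_cons, List.foldl_nil, ih]
      rw [foldl_max_out]

-- B's row, written as a map of suffix maxima over List.range
theorem pvRmuRow_eq (s : List Int) :
    pvRmuRow s = (List.range s.length).map (fun k : Nat => (s.drop (k + 1)).foldl max 0) := by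
  unfold pvRmuRow
  rw [PySem.List.pyRange_one]
  have h : ((s.length : Int) - 0).toNat = s.length := by omega
  rw [h, List.map_map]
  refine List.map_congr_left (fun k _ => ?_)
  have : (0 : Int) + (k : Int) + 1 = ((k + 1 : Nat) : Int) := by push_cast; ring
  simp only [Function.comp, this, PySem.List.slice_from_natCast]
  rfl

-- A's row of reversed running maxima is B's row of suffix maxima
theorem pm_rev_eq_row (s : List Int) :
    (pvPm 0 s.reverse).reverse = pvRmuRow s := by
  rw [pvRmuRow_eq]
  induction s with
  | nil => rfl
  | cons x t ih =>
      rw [List.reverse_cons, pvPm_append, List.reverse_append, List.length_cons,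
        List.range_succ_eq_map, List.map_cons, List.map_map]
      simp only [List.reverse_singleton, List.singleton_append, List.drop_succ_cons,
        List.drop_zero]
      rw [foldl_max_reverse]
      exact congrArg₂ _ rfl (by rw [ih]; exact List.map_congr_left (fun k _ => rfl))

theorem outerA_eq (acc : List (List Int) × List (List Int) × List (List Int)) (s : List Int) :
    pvOuterA acc s =
      (acc.1 ++ [s], acc.2.1 ++ [PySem.List.pyRange ((s.length : Int) - 1) (-1) (-1)],
       acc.2.2 ++ [pvRmuRow s]) := by
  simp only [pvOuterA, foldl_stepA, List.nil_append]
  refine congrArg₂ _ (by simp) (congrArg₂ _ ?_ ?_)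
  · rw [show (pvIdxs 0 s.reverse).reverse
        = PySem.List.pyRange ((s.reverse.length : Int) - 1) (-1) (-1)
        from idxs_rev_eq_pyRange s.reverse]
    simp
  · rw [pm_rev_eq_row]

theorem foldA (ul : List (List Int)) (a b c : List (List Int)) :
    ul.foldl pvOuterA (a, b, c) =
      (a ++ ul, b ++ ul.map (fun s => PySem.List.pyRange ((s.length : Int) - 1) (-1) (-1)),
       c ++ ul.map pvRmuRow) := by
  induction ul generalizing a b c with
  | nil => simp
  | cons s t ih =>
      rw [List.foldl_cons, outerA_eq, ih]
      simp

-- ===== VERDICT (by name: the statement is the Claim_ definition above) =====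
theorem reconstruction_database_spec : Claim_equal_reconstruction_database := by
  intro ul _
  show reconstruction_database ul = reconstruction_database_alt ul
  unfold reconstruction_database reconstruction_database_alt
  rw [foldA]
  simp
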